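-- pv_equiv track=rewrite | github.com/DAlvGar/pymdmix2 | pymdmix/utils/tools.py | num_list_to_mask
-- ===== SOURCE A (Python) =====
-- from itertools import groupby
-- from operator import itemgetter
--
-- def num_list_to_mask(num_list: list[int]) -> str:
--     """
--     Convert list of integers to mask string.
--
--     Parameters
--     ----------
--     num_list : list[int]
--         List of integers.
--
--     Returns
--     -------
--     str
--         Mask string with ranges like "1-5,7,8-20".
--
--     Examples
--     --------
--     >>> num_list_to_mask([1, 2, 3, 7, 10, 11, 12])
--     '1-3,7,10-12'
--     >>> num_list_to_mask([5])
--     '5'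
--     >>> num_list_to_mask([])
--     ''
--     """
--     if not num_list:
--         return ""
--
--     if len(num_list) == 1:
--         return str(num_list[0])
--
--     num_list = sorted(set(num_list))
--     ranges = []
--
--     for k, g in groupby(enumerate(num_list), lambda x: x[0] - x[1]):
--         group = list(map(itemgetter(1), g))
--         if len(group) > 1:
--             ranges.append(f"{group[0]}-{group[-1]}")
--         else:
--             ranges.append(str(group[0]))
--
--     return ",".join(ranges)
-- ===== SOURCE B (Python) =====
-- def num_list_to_mask(num_list: list[int]) -> str:
--     if not num_list:
--         return ""
--     if len(num_list) == 1:
--         return str(num_list[0])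
--
--     nums = sorted(set(num_list))
--     start = prev = nums[0]
--     pieces = []
--     for num in nums[1:]:
--         if num == prev + 1:
--             prev = num
--         else:
--             pieces.append(str(start) if start == prev else f"{start}-{prev}")
--             start = prev = num
--     pieces.append(str(start) if start == prev else f"{start}-{prev}")
--     return ",".join(pieces)
-- ===== Notes on version B (the rewrite author's own statement) =====
-- stated objective: simpler
-- what changed: Replaces the groupby(enumerate(...), index-minus-value) trick that materialises each group as a list with a single explicit run-tracking loop (start/prev accumulators) that emits each range piece directly.
import Mathlib
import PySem

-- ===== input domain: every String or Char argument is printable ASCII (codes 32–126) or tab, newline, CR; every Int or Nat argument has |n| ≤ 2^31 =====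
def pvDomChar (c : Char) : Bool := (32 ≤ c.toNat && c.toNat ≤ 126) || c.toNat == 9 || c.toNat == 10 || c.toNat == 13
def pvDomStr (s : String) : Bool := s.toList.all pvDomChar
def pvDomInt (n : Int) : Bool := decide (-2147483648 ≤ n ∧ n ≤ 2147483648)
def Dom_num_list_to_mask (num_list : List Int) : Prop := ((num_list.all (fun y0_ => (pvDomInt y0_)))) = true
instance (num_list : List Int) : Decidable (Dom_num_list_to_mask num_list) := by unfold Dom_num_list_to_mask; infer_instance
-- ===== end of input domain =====

-- B replaces the groupby(enumerate(...)) grouping with an explicit start/prev run loop; objective: simpler.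

-- ===== PORT A =====
-- enumerate(num_list) starting at index i
def pvEnumFrom (i : Int) : List Int → List (Int × Int)
  | [] => []
  | v :: rest => (i, v) :: pvEnumFrom (i + 1) rest

-- itertools.groupby: collect the leading elements whose key (index - value) equals k
def pvTakeGroup (k : Int) : List (Int × Int) → List (Int × Int) × List (Int × Int)
  | [] => ([], [])
  | (i, v) :: rest =>
    if i - v = k then
      let p := pvTakeGroup k rest
      ((i, v) :: p.1, p.2)
    else ([], (i, v) :: rest)

theorem pvTakeGroup_len (k : Int) : ∀ l : List (Int × Int), (pvTakeGroup k l).2.length ≤ l.length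
  | [] => by simp [pvTakeGroup]
  | (i, v) :: rest => by
    simp only [pvTakeGroup]
    split
    · exact Nat.le_succ_of_le (pvTakeGroup_len k rest)
    · simp

-- groupby(enumerate(nums), lambda x: x[0] - x[1]) as a list of groups
def pvGroupby : List (Int × Int) → List (List (Int × Int))
  | [] => []
  | (i, v) :: rest =>
    let p := pvTakeGroup (i - v) rest
    ((i, v) :: p.1) :: pvGroupby p.2
termination_by l => l.length
decreasing_by exact Nat.lt_succ_of_le (pvTakeGroup_len _ rest)

-- body of A's loop: group = [v for (_, v) in g]; emit 'a-b' or 'a'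
def pvEmitA (h : Int × Int) (t : List (Int × Int)) : String :=
  if (h :: t).length > 1 then
    PySem.Int.toStr h.2 ++ "-" ++ PySem.Int.toStr (t.getLastD h).2
  else
    PySem.Int.toStr h.2

def pvRenderA (g : List (Int × Int)) : String :=
  match g with
  | [] => ""            -- unreachable: groupby groups are nonempty
  | h :: t => pvEmitA h t

def num_list_to_mask (num_list : List Int) : String :=
  if num_list = [] then ""
  else if num_list.length = 1 then PySem.Int.toStr (num_list.headD 0)
  else
    let nums := PySem.List.sorted (PySem.Set.ofList num_list) (fun x => x) false
    let ranges := (pvGroupby (pvEnumFrom 0 nums)).map pvRenderA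
    PySem.Str.join "," ranges

-- ===== PORT B =====
def pvEmitB (start prev : Int) : String :=
  if start = prev then PySem.Int.toStr start
  else PySem.Int.toStr start ++ "-" ++ PySem.Int.toStr prev

-- the explicit run loop of Source B: pieces emitted while scanning nums[1:]
def pvRunsB (start prev : Int) : List Int → List String
  | [] => [pvEmitB start prev]
  | n :: rest =>
    if n = prev + 1 then pvRunsB start n rest
    else pvEmitB start prev :: pvRunsB n n rest

def num_list_to_mask_alt (num_list : List Int) : String :=
  if num_list = [] then ""
  else if num_list.length = 1 then PySem.Int.toStr (num_list.headD 0)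
  else
    match PySem.List.sorted (PySem.Set.ofList num_list) (fun x => x) false with
    | [] => ""          -- unreachable: num_list is nonempty here
    | v :: rest => PySem.Str.join "," (pvRunsB v v rest)

-- ===== PRECONDITION & SPEC =====
def Spec_num_list_to_mask (num_list : List Int) (out : String) : Prop := out = num_list_to_mask_alt num_list
instance (num_list : List Int) (out : String) : Decidable (Spec_num_list_to_mask num_list out) := by unfold Spec_num_list_to_mask; infer_instance

-- ===== CLAIM (what is proved, stated in full; the proofs are below) =====
def Claim_equal_num_list_to_mask : Prop := ∀ (num_list : List Int), Dom_num_list_to_mask num_list → Spec_num_list_to_mask num_list (num_list_to_mask num_list)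

-- ===== LEMMAS AND PROOFS =====

-- proof-side helper: split off the maximal consecutive run extending prev
def pvRunFrom (prev : Int) : List Int → List Int × List Int
  | [] => ([], [])
  | n :: rest =>
    if n = prev + 1 then
      let p := pvRunFrom n rest
      (n :: p.1, p.2)
    else ([], n :: rest)

theorem pvRunFrom_len (prev : Int) : ∀ l : List Int, (pvRunFrom prev l).2.length ≤ l.length := by
  intro l
  induction l generalizing prev with
  | nil => simp [pvRunFrom]
  | cons n rest ih =>
    simp only [pvRunFrom]
    split
    · exact Nat.le_succ_of_le (ih n)
    · simp

-- takeGroup on an enumeration is exactly the consecutive run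
theorem takeGroup_enum (l : List Int) : ∀ (i prev : Int),
    pvTakeGroup (i - prev - 1) (pvEnumFrom i l)
      = (pvEnumFrom i (pvRunFrom prev l).1,
         pvEnumFrom (i + (pvRunFrom prev l).1.length) (pvRunFrom prev l).2) := by
  induction l with
  | nil => intro i prev; simp [pvRunFrom, pvEnumFrom, pvTakeGroup]
  | cons n rest ih =>
    intro i prev
    simp only [pvRunFrom, pvEnumFrom, pvTakeGroup]
    by_cases h : n = prev + 1
    · subst h
      rw [if_pos (show i - (prev + 1) = i - prev - 1 by omega), if_pos rfl]
      rw [show i - prev - 1 = (i + 1) - (prev + 1) - 1 by omega, ih (i + 1) (prev + 1)]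
      simp only [pvEnumFrom, List.length_cons, Prod.mk.injEq]
      refine ⟨trivial, ?_⟩
      congr 1
      push_cast
      omega
    · rw [if_neg (show ¬ (i - n = i - prev - 1) by omega), if_neg h]
      simp [pvEnumFrom]

-- unfolding B's loop by whole runs
theorem runsB_unfold (l : List Int) : ∀ (start prev : Int),
    pvRunsB start prev l
      = pvEmitB start ((pvRunFrom prev l).1.getLastD prev) ::
        (match (pvRunFrom prev l).2 with
         | [] => []
         | n :: r => pvRunsB n n r) := by
  induction l with
  | nil => intro start prev; simp [pvRunsB, pvRunFrom]
  | cons n rest ih =>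
    intro start prev
    simp only [pvRunsB, pvRunFrom]
    by_cases h : n = prev + 1
    · rw [if_pos h, if_pos h, ih start n, List.getLastD_cons]
    · rw [if_neg h, if_neg h]
      rfl

-- the last value of a nonempty run strictly exceeds prev
theorem runFrom_last_gt (l : List Int) : ∀ prev : Int,
    (pvRunFrom prev l).1 ≠ [] → prev < (pvRunFrom prev l).1.getLastD prev := by
  induction l with
  | nil => intro prev h; simp [pvRunFrom] at h
  | cons n rest ih =>
    intro prev hne
    simp only [pvRunFrom] at hne ⊢
    by_cases h : n = prev + 1
    · rw [if_pos h, List.getLastD_cons]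
      by_cases hr : (pvRunFrom n rest).1 = []
      · rw [hr, List.getLastD_nil]; omega
      · have := ih n hr; omega
    · rw [if_neg h] at hne; simp at hne

-- last of an enumerated list projects to last of the list
theorem enum_getLastD (l : List Int) : ∀ (j : Int) (d : Int × Int),
    ((pvEnumFrom j l).getLastD d).2 = l.getLastD d.2 := by
  induction l with
  | nil => intro j d; simp [pvEnumFrom]
  | cons n rest ih =>
    intro j d
    simp only [pvEnumFrom, List.getLastD_cons]
    exact ih (j + 1) (j, n)

theorem enum_length (l : List Int) : ∀ i, (pvEnumFrom i l).length = l.length := by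
  induction l with
  | nil => intro i; simp [pvEnumFrom]
  | cons n rest ih => intro i; simp [pvEnumFrom, ih]

-- main list-level equivalence, by strong induction on the length
theorem lists_eq (N : Nat) : ∀ (l : List Int), l.length ≤ N → ∀ (i v : Int),
    (pvGroupby (pvEnumFrom i (v :: l))).map pvRenderA = pvRunsB v v l := by
  induction N with
  | zero =>
    intro l hl i v
    have : l = [] := List.length_eq_zero_iff.mp (Nat.le_zero.mp hl)
    subst this
    simp only [pvEnumFrom]
    rw [pvGroupby]
    simp [pvTakeGroup, pvGroupby, pvRenderA, pvEmitA, pvRunsB, pvEmitB]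
  | succ N ih =>
    intro l hl i v
    have hgb : pvGroupby (pvEnumFrom i (v :: l))
        = ((i, v) :: (pvTakeGroup (i - v) (pvEnumFrom (i + 1) l)).1)
          :: pvGroupby (pvTakeGroup (i - v) (pvEnumFrom (i + 1) l)).2 := by
      simp only [pvEnumFrom]
      rw [pvGroupby]
    have hk : i - v = (i + 1) - v - 1 := by omega
    rw [hgb, hk, takeGroup_enum l (i + 1) v]
    rw [runsB_unfold l v v]
    simp only [List.map_cons]
    congr 1
    · -- heads agree
      simp only [pvRenderA, pvEmitA, pvEmitB]
      by_cases hr : (pvRunFrom v l).1 = []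
      · rw [hr]; simp [pvEnumFrom]
      · have hgt := runFrom_last_gt l v hr
        have hne : ¬ (v = (pvRunFrom v l).1.getLastD v) := by omega
        rw [if_neg hne]
        have hlen : ((i, v) :: pvEnumFrom (i + 1) (pvRunFrom v l).1).length > 1 := by
          simp only [List.length_cons, enum_length]
          cases h : (pvRunFrom v l).1 with
          | nil => exact absurd h hr
          | cons a b => simp
        rw [if_pos hlen, enum_getLastD]
    · -- tails agree
      cases hrest : (pvRunFrom v l).2 with
      | nil =>
        show List.map pvRenderA (pvGroupby []) = []
        rw [pvGroupby]
        rfl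
      | cons n r =>
        show List.map pvRenderA (pvGroupby (pvEnumFrom (i + 1 + ((pvRunFrom v l).1.length : Int)) (n :: r))) = pvRunsB n n r
        apply ih
        have h2 := pvRunFrom_len v l
        rw [hrest] at h2
        simp at h2
        omega

theorem sorted_set_ne_nil (num_list : List Int) (h : num_list ≠ []) :
    PySem.List.sorted (PySem.Set.ofList num_list) (fun x => x) false ≠ [] := by
  intro hc
  rw [PySem.List.sorted_eq_nil_iff] at hc
  cases num_list with
  | nil => exact h rfl
  | cons a l =>
    have : a ∈ PySem.Set.ofList (a :: l) := by
      rw [PySem.Set.mem_ofList]; exact List.mem_cons_self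
    rw [hc] at this
    exact absurd this (List.not_mem_nil)

-- ===== VERDICT (by name: the statement is the Claim_ definition above) =====
theorem num_list_to_mask_spec : Claim_equal_num_list_to_mask := by
  intro num_list _
  unfold Spec_num_list_to_mask num_list_to_mask num_list_to_mask_alt
  by_cases h0 : num_list = []
  · simp [h0]
  · rw [if_neg h0, if_neg h0]
    by_cases h1 : num_list.length = 1
    · rw [if_pos h1, if_pos h1]
    · rw [if_neg h1, if_neg h1]
      cases hs : PySem.List.sorted (PySem.Set.ofList num_list) (fun x => x) false with
      | nil => exact absurd hs (sorted_set_ne_nil num_list h0)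
      | cons v rest =>
        show PySem.Str.join "," ((pvGroupby (pvEnumFrom 0 (v :: rest))).map pvRenderA)
           = PySem.Str.join "," (pvRunsB v v rest)
        exact congrArg _ (lists_eq rest.length rest (le_refl _) 0 v)
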